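-- pv_equiv track=rewrite | github.com/apawloski/wl-scoreboard | build_scoreboard.py | rank_team_totals
-- ===== SOURCE A (Python) =====
-- def rank_team_totals(unranked_team_totals):
--     """Given a dict of unranked teams -> totals, generates a ranked list of tuples (rank, team, total)"""
--     # Sort the teams -- highest season-score first
--     sorted_team_totals = {k: v for k, v in sorted(unranked_team_totals.items(),
--                                                   key=lambda item: item[1],
--                                                   reverse=True)}
--
--     # Generates list of tuples (Rank, Team, Score)
--     ranked_team_totals = []
--     rank = 1
--     last_score = None
--     for i,team in enumerate(sorted_team_totals):
--         score = sorted_team_totals[team]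
--         if score != last_score:
--             rank = i+1
--         ranked_team_totals.append((rank, team, score))
--         last_score = score
--
--     return ranked_team_totals
-- ===== SOURCE B (Python) =====
-- def rank_team_totals(unranked_team_totals):
--     """Given a dict of unranked teams -> totals, generates a ranked list of tuples (rank, team, total)"""
--     # Stable descending sort, same tie order as the original.
--     items = sorted(unranked_team_totals.items(), key=lambda kv: kv[1], reverse=True)
--     # Rank of a total = 1 + index of its first occurrence in the sorted order
--     # (= 1 + number of strictly greater totals); record it once per total.
--     first = {}
--     for i, (_, total) in enumerate(items):
--         first.setdefault(total, i)
--     return [(first[total] + 1, team, total) for team, total in items]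
-- ===== Notes on version B (the rewrite author's own statement) =====
-- stated objective: alternative
-- what changed: Replaces A's sequential last_score/rank boundary detector (and its rebuilt dict with per-team lookups) by a hash map from each total to the index of its first occurrence in the sorted order, from which every rank is read off independently.
import Mathlib
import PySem

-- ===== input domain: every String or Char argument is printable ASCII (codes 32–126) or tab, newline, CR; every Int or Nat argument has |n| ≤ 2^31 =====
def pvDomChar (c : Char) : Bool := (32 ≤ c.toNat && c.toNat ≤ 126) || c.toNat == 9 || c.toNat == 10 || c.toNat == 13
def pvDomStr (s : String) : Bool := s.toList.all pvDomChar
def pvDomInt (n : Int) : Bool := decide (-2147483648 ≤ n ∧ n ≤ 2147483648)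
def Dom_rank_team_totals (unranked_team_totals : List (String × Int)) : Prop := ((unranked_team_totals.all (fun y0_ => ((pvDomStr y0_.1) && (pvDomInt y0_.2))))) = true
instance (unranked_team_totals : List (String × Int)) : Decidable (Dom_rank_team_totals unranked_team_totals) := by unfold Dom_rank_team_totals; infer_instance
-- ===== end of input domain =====

-- B replaces A's sequential last_score/rank boundary scan by a map total -> first index
-- in the sorted order, reading each rank off independently (alternative decomposition,
-- same O(n log n) cost). The dict parameter is modelled as PySem.Dict.ofList of the
-- association list in both ports.

-- ===== PORT A =====
-- the 'for i, team in enumerate(sorted_team_totals): …' loop, carrying i, rank, last_score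
def pvLoopA (d : PySem.Dict String Int) : List String → Int → Int → Option Int → List (Int × String × Int)
  | [], _, _, _ => []
  | team :: rest, i, rank, last_score =>
    let score := d.getD team 0          -- sorted_team_totals[team]; team ∈ keys, so no KeyError
    let rank' := if some score ≠ last_score then i + 1 else rank
    (rank', team, score) :: pvLoopA d rest (i + 1) rank' (some score)

def rank_team_totals (unranked_team_totals : List (String × Int)) : List (Int × String × Int) :=
  let d := PySem.Dict.ofList unranked_team_totals   -- the dict the Python function receives
  let sorted_team_totals :=
    PySem.Dict.ofList (PySem.List.sorted d.items (fun item => item.2) true)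
  pvLoopA sorted_team_totals sorted_team_totals.keys 0 1 none

-- ===== PORT B =====
def rank_team_totals_alt (unranked_team_totals : List (String × Int)) : List (Int × String × Int) :=
  let d := PySem.Dict.ofList unranked_team_totals   -- the dict the Python function receives
  let items := PySem.List.sorted d.items (fun kv => kv.2) true
  let first := (PySem.List.enumerate items).foldl
    (fun f p => f.setdefault p.2.2 p.1) PySem.Dict.empty
  items.map (fun p => ((first.get? p.2).getD 0 + 1, p.1, p.2))  -- first[total]; total ∈ first, so no KeyError

-- ===== PRECONDITION & SPEC =====
def Spec_rank_team_totals (unranked_team_totals : List (String × Int)) (out : List (Int × String × Int)) : Prop := out = rank_team_totals_alt unranked_team_totals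
instance (unranked_team_totals : List (String × Int)) (out : List (Int × String × Int)) : Decidable (Spec_rank_team_totals unranked_team_totals out) := by unfold Spec_rank_team_totals; infer_instance

-- ===== CLAIM (what is proved, stated in full; the proofs are below) =====
def Claim_equal_rank_team_totals : Prop := ∀ (unranked_team_totals : List (String × Int)), Dom_rank_team_totals unranked_team_totals → Spec_rank_team_totals unranked_team_totals (rank_team_totals unranked_team_totals)

-- ===== LEMMAS AND PROOFS =====

-- first index of v in pre ++ v :: t when v is not in pre
theorem pv_idxOf_append (pre : List Int) (v : Int) (t : List Int) (h : v ∉ pre) :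
    List.idxOf v (pre ++ v :: t) = pre.length := by
  induction pre with
  | nil => simp [List.idxOf_cons_self]
  | cons a l ih =>
    simp only [List.mem_cons, not_or] at h
    simp [List.cons_append, Ne.symm h.1, ih h.2]

-- a dict built from a list with distinct keys has exactly that items list
theorem pv_items_ofList (s : List (String × Int)) (h : (s.map Prod.fst).Nodup) :
    (PySem.Dict.ofList s).items = s := by
  simp only [PySem.Dict.ofList, PySem.Dict.update]
  rw [PySem.Dict.items_foldl_insert_fresh (k := Prod.fst) (v := Prod.snd)]
  · simp [PySem.Dict.empty]
  · simp
  · exact h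

theorem pv_A_go (d : PySem.Dict String Int) (s : List (String × Int))
    (hitems : d.items = s) (hnd : d.keys.Nodup)
    (hsort : (s.map (·.2)).Pairwise (· ≥ ·)) :
    ∀ suf pre rank last_score, s = pre ++ suf →
      last_score = (pre.map (·.2)).getLast? →
      (∀ L, last_score = some L → rank = ((s.map (·.2)).idxOf L : Int) + 1) →
      pvLoopA d (suf.map Prod.fst) (pre.length : Int) rank last_score
        = suf.map (fun p => (((s.map (·.2)).idxOf p.2 : Int) + 1, p.1, p.2)) := by
  intro suf
  induction suf with
  | nil => intro pre rank last hs hlast hrank; simp [pvLoopA]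
  | cons hd t ih =>
    intro pre rank last hs hlast hrank
    obtain ⟨k, v⟩ := hd
    have hmem : (k, v) ∈ s := by rw [hs]; exact List.mem_append_right _ (List.mem_cons_self)
    have hscore : d.getD k 0 = v := by
      apply PySem.Dict.getD_of_mem_items
      · rw [hitems]; exact hmem
      · exact hnd
    have hvs : s.map (·.2) = pre.map (·.2) ++ v :: t.map (·.2) := by
      rw [hs]; simp
    have hrank' : (if some v ≠ last then (pre.length : Int) + 1 else rank)
        = ((s.map (·.2)).idxOf v : Int) + 1 := by
      cases hl : last with
      | none =>
        have hpre : pre = [] := by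
          rw [hl] at hlast
          cases pre with
          | nil => rfl
          | cons a l =>
            have := List.getLast?_eq_none_iff.mp hlast.symm
            simp at this
        subst hpre
        simp [hvs, List.idxOf_cons_self]
      | some L =>
        have hpne : pre ≠ [] := by
          intro h; rw [h, hl] at hlast; simp at hlast
        by_cases hvL : v = L
        · subst hvL
          rw [hl] at hrank
          simp [hrank v rfl]
        · -- v differs from the previous score: rank = i + 1 = idxOf v + 1
          have hne : (some v ≠ some L) := by simp [hvL]
          have hnotin : v ∉ pre.map (·.2) := by
            intro hvin
            -- decompose pre's values as init ++ [L]
            have hpvne : pre.map (·.2) ≠ [] := by simp [hpne]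
            have hLlast : (pre.map (·.2)).getLast hpvne = L := by
              rw [hl] at hlast
              have := List.getLast?_eq_some_getLast hpvne
              rw [this] at hlast
              exact (Option.some.injEq _ _ ▸ hlast.symm : _)
            have hdecomp : pre.map (·.2) = (pre.map (·.2)).dropLast ++ [L] := by
              conv_lhs => rw [← List.dropLast_append_getLast hpvne]
              rw [hLlast]
            -- from sortedness: L ≥ v (L is in pre-values, v heads the suffix)
            have hLmem : L ∈ pre.map (·.2) := by
              rw [hdecomp]; exact List.mem_append_right _ (List.mem_cons_self)
            have hsplit := (List.pairwise_append.mp (hvs ▸ hsort)).2.2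
            have hLgev : L ≥ v := hsplit L hLmem v (List.mem_cons_self)
            -- from sortedness within pre-values: v ≥ L
            have hpp : (pre.map (·.2)).Pairwise (· ≥ ·) :=
              (List.pairwise_append.mp (hvs ▸ hsort)).1
            have hvgeL : v ≥ L := by
              rw [hdecomp] at hpp hvin
              rcases List.mem_append.mp hvin with hvd | hvL'
              · exact (List.pairwise_append.mp hpp).2.2 v hvd L (List.mem_cons_self)
              · exact absurd (List.mem_singleton.mp hvL') hvL
            exact hvL (le_antisymm hLgev hvgeL)
          rw [if_pos hne, hvs, pv_idxOf_append _ _ _ hnotin]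
          simp
    simp only [List.map_cons, pvLoopA, hscore, hrank']
    refine congrArg _ ?_
    have := ih (pre ++ [(k, v)]) (((s.map (·.2)).idxOf v : Int) + 1) (some v)
      (by rw [hs]; simp)
      (by simp)
      (by intro L hL; injection hL with hL; rw [hL])
    simpa using this

theorem pv_B_go (s : List (String × Int)) :
    ∀ t pre (f : PySem.Dict Int Int), s = pre ++ t →
      (∀ v, f.contains v = true ↔ v ∈ pre.map (·.2)) →
      (∀ v ∈ pre.map (·.2), f.get? v = some ((s.map (·.2)).idxOf v : Int)) →
      ∀ v ∈ s.map (·.2),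
        ((PySem.List.enumerate t (pre.length : Int)).foldl
          (fun f p => f.setdefault p.2.2 p.1) f).get? v
          = some ((s.map (·.2)).idxOf v : Int) := by
  intro t
  induction t with
  | nil =>
    intro pre f hs hc hg v hv
    simp only [PySem.List.enumerate_nil, List.foldl_nil]
    exact hg v (by rw [hs, List.append_nil] at hv; exact hv)
  | cons hd t ih =>
    intro pre f hs hc hg v hv
    obtain ⟨k, w⟩ := hd
    rw [PySem.List.enumerate_cons, List.foldl_cons]
    by_cases hcw : f.contains w = true
    · -- w already seen: setdefault leaves f unchanged
      rw [PySem.Dict.setdefault_of_contains _ _ hcw]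
      have := ih (pre ++ [(k, w)]) f (by rw [hs]; simp)
        (by intro u
            rw [hc u]
            have hwmem : w ∈ pre.map (·.2) := (hc w).mp hcw
            simp only [List.map_append, List.mem_append]
            constructor
            · exact Or.inl
            · rintro (h | h)
              · exact h
              · simp at h; rw [h]; exact hwmem)
        (by intro u hu
            simp only [List.map_append, List.mem_append] at hu
            rcases hu with h | h
            · exact hg u h
            · simp at h; rw [h]; exact hg w ((hc w).mp hcw))
        v hv
      simpa using this
    · -- first occurrence of w: record its index
      have hcw' : f.contains w = false := by simpa using hcw
      rw [PySem.Dict.setdefault_of_not_contains _ _ hcw']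
      have hwnotin : w ∉ pre.map (·.2) := fun h => hcw ((hc w).mpr h)
      have hidx : (s.map (·.2)).idxOf w = pre.length := by
        have : s.map (·.2) = pre.map (·.2) ++ w :: t.map (·.2) := by rw [hs]; simp
        rw [this, pv_idxOf_append _ _ _ hwnotin]
        simp
      have := ih (pre ++ [(k, w)]) (f.insert w (pre.length : Int)) (by rw [hs]; simp)
        (by intro u
            rw [PySem.Dict.contains_insert]
            simp only [List.map_append, List.mem_append]
            constructor
            · intro h
              rcases Bool.or_eq_true_iff.mp h with h | h
              · refine Or.inr ?_
                simp at h ⊢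
                exact h
              · exact Or.inl ((hc u).mp h)
            · rintro (h | h)
              · exact Bool.or_eq_true_iff.mpr (Or.inr ((hc u).mpr h))
              · refine Bool.or_eq_true_iff.mpr (Or.inl ?_)
                simp at h ⊢
                exact h)
        (by intro u hu
            simp only [List.map_append, List.mem_append] at hu
            by_cases huw : u = w
            · rw [huw, PySem.Dict.get?_insert_self, hidx]
            · rw [PySem.Dict.get?_insert_of_ne _ _ huw]
              rcases hu with h | h
              · exact hg u h
              · simp at h; exact absurd h huw)
        v hv
      simpa using this

-- ===== VERDICT (by name: the statement is the Claim_ definition above) =====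
theorem rank_team_totals_spec : Claim_equal_rank_team_totals := by
  intro u _
  unfold Spec_rank_team_totals rank_team_totals rank_team_totals_alt
  simp only []
  set d0 := PySem.Dict.ofList u with hd0
  set s := PySem.List.sorted d0.items (fun item => item.2) true with hsdef
  have hperm : s.Perm d0.items := PySem.List.sorted_perm _ _ _
  have hnodup : (s.map Prod.fst).Nodup := by
    have h0 : (d0.items.map Prod.fst).Nodup := PySem.Dict.nodup_keys_ofList u
    exact ((hperm.map Prod.fst).nodup_iff).mpr h0
  have hsort : (s.map (·.2)).Pairwise (· ≥ ·) := by
    have := PySem.List.sorted_pairwise_rev (xs := d0.items) (key := fun item => item.2)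
    rw [← hsdef] at this
    exact List.pairwise_map.mpr this
  have hitems : (PySem.Dict.ofList s).items = s := pv_items_ofList s hnodup
  have hkeys : (PySem.Dict.ofList s).keys = s.map Prod.fst := by
    simp [PySem.Dict.keys, hitems]
  have hknd : (PySem.Dict.ofList s).keys.Nodup := by rw [hkeys]; exact hnodup
  -- A's loop produces the canonical rank-by-first-index list
  have hA : pvLoopA (PySem.Dict.ofList s) (PySem.Dict.ofList s).keys 0 1 none
      = s.map (fun p => (((s.map (·.2)).idxOf p.2 : Int) + 1, p.1, p.2)) := by
    have := pv_A_go (PySem.Dict.ofList s) s hitems hknd hsort s [] 1 none rfl rfl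
      (by intro L h; cases h)
    rw [hkeys]
    simpa using this
  -- B's map produces the same list
  have hB : s.map (fun p =>
      ((((PySem.List.enumerate s 0).foldl (fun f p => f.setdefault p.2.2 p.1)
          PySem.Dict.empty).get? p.2).getD 0 + 1, p.1, p.2))
      = s.map (fun p => (((s.map (·.2)).idxOf p.2 : Int) + 1, p.1, p.2)) := by
    apply List.map_congr_left
    intro p hp
    have hv : p.2 ∈ s.map (·.2) := List.mem_map_of_mem hp
    have := pv_B_go s s [] PySem.Dict.empty rfl
      (by intro v; simp [PySem.Dict.contains_empty])
      (by intro v hv'; cases hv') p.2 hv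
    simp only [List.length_nil, Nat.cast_zero] at this
    rw [this]
    simp
  rw [hA, ← hB]
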